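-- pv_equiv track=rewrite | github.com/SUNCAT-Center/AtomicStructureGenerator | cspd.py | subst_ele
-- ===== SOURCE A (Python) =====
-- def subst_ele(numbers, atomnn):
--     locatomnn = atomnn.copy()
--     origatomnn = unify_an(numbers)
--     for key in origatomnn.keys():
--         for key2 in locatomnn.keys():
--             if origatomnn[key] == locatomnn[key2]:
--                 origatomnn[key] = key2
--                 del locatomnn[key2]
--                 break
--     tmpn = []
--     for key in numbers:
--         tmpn.append(origatomnn[key])
--     return tmpn
--
-- def unify_an(numbers):
--     '''
--     Stores the composition type in a dictionary.
--     :param numbers: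
--     :return:
--     '''
--     atmnn = {}
--     for i in numbers:
--         if i in atmnn:
--             atmnn[i] += 1
--         else:
--             atmnn[i] = 1
--     natom = sorted(atmnn.values())
--     if len(natom) == 1:
--         for symb in atmnn.keys():
--             atmnn[symb] = 1
--         return atmnn
--     gcd = natom[0]
--     for i in natom[1:]:
--         n1 = gcd
--         n2 = i
--         while True:
--             gcd = n2 % n1
--             if gcd == 0:
--                 gcd = n1
--                 break
--             elif gcd == 1:
--                 return atmnn
--             else:
--                 n2 = n1
--                 n1 = gcd
--     for symb in atmnn.keys():
--         atmnn[symb] = int(float(atmnn[symb]) / gcd + 0.5)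
--     return atmnn
-- ===== SOURCE B (Python) =====
-- def subst_ele(numbers, atomnn):
--     # counts of each atomic number, in first-occurrence order
--     counts = {}
--     for i in numbers:
--         counts[i] = counts.get(i, 0) + 1
--     # gcd of all counts (composition reduction; 0 only when numbers is empty)
--     g = 0
--     for v in counts.values():
--         while v:
--             g, v = v, g % v
--     # FIFO queues: reduced count -> atomnn keys with that count, in insertion order
--     queues = {}
--     for k, v in atomnn.items():
--         queues[v] = queues.get(v, []) + [k]
--     # relabel each distinct number by the first unused atomnn key with its reduced count
--     relabel = {}
--     for k, c in counts.items():
--         r = c // g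
--         q = queues.get(r)
--         if q:
--             relabel[k] = q[0]
--             queues[r] = q[1:]
--         else:
--             relabel[k] = r
--     return [relabel[n] for n in numbers]
-- ===== Notes on version B (the rewrite author's own statement) =====
-- stated objective: faster
-- what changed: B replaces unify_an's sorted-values Euclid cascade with a plain running gcd over the counts, divides each count by it directly, and replaces A's quadratic scan-and-delete over the remaining atomnn entries by a grouping dict built once that maps each count to the FIFO queue of atomnn keys with that count, so each distinct number is relabelled by one dictionary lookup instead of an inner scan.
import Mathlib
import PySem

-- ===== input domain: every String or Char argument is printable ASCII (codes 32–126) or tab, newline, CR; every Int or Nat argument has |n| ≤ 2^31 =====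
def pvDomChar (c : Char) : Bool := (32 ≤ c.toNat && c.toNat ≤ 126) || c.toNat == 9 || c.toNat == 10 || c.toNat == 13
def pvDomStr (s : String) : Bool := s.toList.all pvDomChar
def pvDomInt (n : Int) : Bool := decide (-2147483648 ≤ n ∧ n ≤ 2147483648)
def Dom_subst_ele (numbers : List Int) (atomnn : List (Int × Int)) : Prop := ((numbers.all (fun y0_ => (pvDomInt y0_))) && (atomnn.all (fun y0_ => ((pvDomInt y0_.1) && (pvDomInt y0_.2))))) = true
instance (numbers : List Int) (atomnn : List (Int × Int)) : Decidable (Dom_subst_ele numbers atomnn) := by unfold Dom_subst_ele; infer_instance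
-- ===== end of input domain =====

-- B builds a count→FIFO-queue-of-keys dict once and reduces the counts by a single running gcd,
-- removing A's inner scan-and-delete pass and unify_an's Euclid cascade over the sorted counts.

-- ===== PORT A =====
-- unify_an: atmnn = {}; for i in numbers: if i in atmnn: atmnn[i] += 1 else: atmnn[i] = 1
def pvCounterA (numbers : List Int) : PySem.Dict Int Int :=
  numbers.foldl
    (fun d i => if d.contains i then d.modify i 0 (· + 1) else d.insert i 1)
    PySem.Dict.empty

-- the 'while True' Euclid block: returns none where Python does 'return atmnn' (remainder hit 1)
def pvEuclidA (n1 n2 : Int) : Option Int :=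
  if _h1 : n1 ≤ 0 then some n1  -- totality guard only; the loop is entered with positive counts
  else
    let g := PySem.Int.mod n2 n1
    if g = 0 then some n1
    else if g = 1 then none
    else pvEuclidA g n1
termination_by n1.toNat
decreasing_by
  have h3 := PySem.Int.mod_lt n2 (show (0:Int) < n1 by omega)
  omega

def pvUnifyAn (numbers : List Int) : PySem.Dict Int Int :=
  let atmnn := pvCounterA numbers
  let natom := PySem.List.sorted atmnn.values (fun x => x) false
  if natom.length = 1 then
    atmnn.keys.foldl (fun d s => d.insert s 1) atmnn
  else
    match natom with
    | [] => atmnn  -- Python raises IndexError on natom[0] here (only when numbers = []); excluded by Pre_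
    | g0 :: rest =>
      match rest.foldl (fun acc i => acc.bind fun g => pvEuclidA g i) (some g0) with
      | none => atmnn  -- the early 'return atmnn' (some remainder hit 1)
      | some g =>
        -- int(float(atmnn[symb]) / gcd + 0.5): exact here — gcd divides every count and
        -- all values are far below 2^53, so the float computes the integer quotient exactly
        atmnn.keys.foldl (fun d s => d.insert s (PySem.Int.floordiv (d.getD s 0) g)) atmnn

-- the inner 'for key2 in locatomnn.keys(): … del …; break' scan
def pvFindA (loc : List (Int × Int)) (c : Int) : Option Int × List (Int × Int) :=
  match loc with
  | [] => (none, [])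
  | (k2, v) :: rest =>
    if v = c then (some k2, rest)
    else
      let r := pvFindA rest c
      (r.1, (k2, v) :: r.2)

def pvStepA (st : PySem.Dict Int Int × List (Int × Int)) (key : Int) :
    PySem.Dict Int Int × List (Int × Int) :=
  match pvFindA st.2 (st.1.getD key 0) with
  | (some key2, loc') => (st.1.insert key key2, loc')
  | (none, loc') => (st.1, loc')

def subst_ele (numbers : List Int) (atomnn : List (Int × Int)) : List Int :=
  let origatomnn := pvUnifyAn numbers
  let st := origatomnn.keys.foldl pvStepA (origatomnn, atomnn)
  numbers.map (fun key => st.1.getD key 0)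

-- ===== PORT B =====
-- counts[i] = counts.get(i, 0) + 1
def pvCounterB (numbers : List Int) : PySem.Dict Int Int :=
  numbers.foldl (fun d i => d.insert i (d.getD i 0 + 1)) PySem.Dict.empty

-- while v: g, v = v, g % v   (the guard also exits on v = 0; v < 0 never occurs: counts are positive)
def pvGcdLoop (g v : Int) : Int :=
  if _hv : v ≤ 0 then g
  else pvGcdLoop v (PySem.Int.mod g v)
termination_by v.toNat
decreasing_by
  have h3 := PySem.Int.mod_lt g (show (0:Int) < v by omega)
  omega

-- queues[v] = queues.get(v, []) + [k]
def pvQueues (atomnn : List (Int × Int)) : PySem.Dict Int (List Int) :=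
  atomnn.foldl (fun d p => d.insert p.2 (d.getD p.2 [] ++ [p.1])) PySem.Dict.empty

-- loop body: r = c // g; q = queues.get(r); relabel[k] = q[0] and queues[r] = q[1:] if q else r
def pvRelStep (g : Int) (st : PySem.Dict Int Int × PySem.Dict Int (List Int)) (p : Int × Int) :
    PySem.Dict Int Int × PySem.Dict Int (List Int) :=
  let r := PySem.Int.floordiv p.2 g
  match st.2.getD r [] with
  | [] => (st.1.insert p.1 r, st.2)
  | x :: rest => (st.1.insert p.1 x, st.2.insert r rest)

def subst_ele_alt (numbers : List Int) (atomnn : List (Int × Int)) : List Int :=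
  let counts := pvCounterB numbers
  let g := counts.values.foldl pvGcdLoop 0
  let st := counts.items.foldl (pvRelStep g) (PySem.Dict.empty, pvQueues atomnn)
  numbers.map (fun n => st.1.getD n 0)

-- ===== PRECONDITION & SPEC =====
-- Pre_ excludes exactly the empty numbers list, on which A raises IndexError
-- (natom[0] on the empty sorted count list in unify_an).
def Pre_subst_ele (numbers : List Int) (atomnn : List (Int × Int)) : Prop :=
  numbers ≠ []
instance (numbers : List Int) (atomnn : List (Int × Int)) : Decidable (Pre_subst_ele numbers atomnn) := by
  unfold Pre_subst_ele; infer_instance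

def pvWitness_subst_ele : List Int × (List (Int × Int)) := ([1, 1, 2], [(5, 1), (7, 2)])

def Spec_subst_ele (numbers : List Int) (atomnn : List (Int × Int)) (out : List Int) : Prop :=
  out = subst_ele_alt numbers atomnn
instance (numbers : List Int) (atomnn : List (Int × Int)) (out : List Int) : Decidable (Spec_subst_ele numbers atomnn out) := by
  unfold Spec_subst_ele; infer_instance

-- ===== CLAIM (what is proved, stated in full; the proofs are below) =====
def Claim_equal_subst_ele : Prop := ∀ (numbers : List Int) (atomnn : List (Int × Int)), Dom_subst_ele numbers atomnn → Pre_subst_ele numbers atomnn → Spec_subst_ele numbers atomnn (subst_ele numbers atomnn)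

-- ===== LEMMAS AND PROOFS =====

-- B's pvRelStep g on (k, v) is the division-free step on (k, v // g)
def pvStepB (st : PySem.Dict Int Int × PySem.Dict Int (List Int)) (p : Int × Int) :
    PySem.Dict Int Int × PySem.Dict Int (List Int) :=
  match st.2.getD p.2 [] with
  | [] => (st.1.insert p.1 p.2, st.2)
  | x :: rest => (st.1.insert p.1 x, st.2.insert p.2 rest)

-- the two counter loops build the same dict (Counter(numbers))
lemma counterA_eq (numbers : List Int) : pvCounterA numbers = PySem.Dict.counter numbers := by
  unfold pvCounterA
  rw [PySem.Dict.counter_eq_foldl]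
  have hf : (fun (d : PySem.Dict Int Int) i => if d.contains i then d.modify i 0 (· + 1) else d.insert i 1)
      = (fun (d : PySem.Dict Int Int) x => d.modify x 0 fun x => x + 1) := by
    funext d i
    by_cases h : d.contains i
    · simp [h]
    · have h0 : d.getD i 0 = 0 := PySem.Dict.getD_of_not_contains d 0 (by simpa using h)
      have hm : d.modify i 0 (fun x => x + 1) = d.insert i (d.getD i 0 + 1) := rfl
      simp [h, hm, h0]
  rw [hf]

lemma counterB_eq (numbers : List Int) : pvCounterB numbers = PySem.Dict.counter numbers := by
  exact PySem.Dict.foldl_insert_getD_add_one_eq_counter numbers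

-- B's gcd loop is Nat.gcd
lemma gcdLoop_natCast : ∀ (n m : Nat), pvGcdLoop (m : Int) (n : Int) = ((Nat.gcd n m : Nat) : Int) := by
  intro n
  induction n using Nat.strong_induction_on with
  | _ n ih =>
    intro m
    unfold pvGcdLoop
    by_cases h : (n : Int) ≤ 0
    · have hn : n = 0 := by omega
      subst hn
      rw [dif_pos h]
      simp
    · rw [dif_neg h]
      have hn : 0 < n := by omega
      rw [PySem.Int.mod_natCast m n, ih (m % n) (Nat.mod_lt m hn) n]
      rw [Nat.gcd_rec n m]

lemma foldl_gcdLoop_natCast (l : List Nat) : ∀ (a : Nat),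
    (l.map (fun (n : Nat) => (n : Int))).foldl pvGcdLoop (a : Int)
      = ((l.foldl (fun x y => Nat.gcd y x) a : Nat) : Int) := by
  induction l with
  | nil => intro a; rfl
  | cons v t ih =>
    intro a
    simp only [List.map_cons, List.foldl_cons]
    rw [gcdLoop_natCast v a]
    exact ih (Nat.gcd v a)

-- A's while-True block computes Nat.gcd, signalling none exactly when a remainder hits 1
lemma euclidA_natCast : ∀ (m n : Nat), 1 ≤ m →
    pvEuclidA (m : Int) (n : Int)
      = if Nat.gcd m n = 1 ∧ m ≠ 1 then none else some ((Nat.gcd m n : Nat) : Int) := by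
  intro m
  induction m using Nat.strong_induction_on with
  | _ m ih =>
    intro n hm
    unfold pvEuclidA
    rw [dif_neg (by omega : ¬ (m : Int) ≤ 0)]
    simp only [PySem.Int.mod_natCast n m]
    by_cases h0 : n % m = 0
    · have hg : Nat.gcd m n = m := Nat.gcd_eq_left (Nat.dvd_of_mod_eq_zero h0)
      have h0' : ((n % m : Nat) : Int) = 0 := by exact_mod_cast h0
      rw [if_pos h0', if_neg (by rintro ⟨h1, h2⟩; rw [hg] at h1; exact h2 h1), hg]
    · have hm1 : m ≠ 1 := by
        intro e; exact h0 (by rw [e]; exact Nat.mod_one n)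
      rw [if_neg (show ¬((n % m : Nat) : Int) = 0 by exact_mod_cast h0)]
      by_cases h1 : n % m = 1
      · have hg : Nat.gcd m n = 1 := by
          rw [Nat.gcd_rec m n, h1, Nat.gcd_one_left]
        rw [if_pos (show ((n % m : Nat) : Int) = 1 by exact_mod_cast h1),
          if_pos (show Nat.gcd m n = 1 ∧ m ≠ 1 from ⟨hg, hm1⟩)]
      · rw [if_neg (show ¬((n % m : Nat) : Int) = 1 by exact_mod_cast h1)]
        have hlt : n % m < m := Nat.mod_lt n (by omega)
        rw [ih (n % m) hlt m (by omega)]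
        simp only [Nat.gcd_rec m n]
        simp [h1, hm1]

lemma foldl_bind_none (t : List Int) :
    t.foldl (fun acc i => acc.bind fun g => pvEuclidA g i) none = none := by
  induction t with
  | nil => rfl
  | cons a t ih => simpa using ih

lemma foldl_gcd_one (t : List Nat) : t.foldl (fun x y => Nat.gcd y x) 1 = 1 := by
  induction t with
  | nil => rfl
  | cons a t ih => simpa [Nat.gcd_one_right] using ih

lemma foldl_euclidA (l : List Nat) : ∀ (g0 : Nat), 1 ≤ g0 →
    ((l.map (fun (n : Nat) => (n : Int))).foldl (fun acc i => acc.bind fun g => pvEuclidA g i) (some (g0 : Int)) = none →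
        l.foldl (fun x y => Nat.gcd y x) g0 = 1)
    ∧ (∀ G : Int,
        (l.map (fun (n : Nat) => (n : Int))).foldl (fun acc i => acc.bind fun g => pvEuclidA g i) (some (g0 : Int)) = some G →
        G = ((l.foldl (fun x y => Nat.gcd y x) g0 : Nat) : Int)) := by
  induction l with
  | nil =>
    intro g0 hg
    constructor
    · intro h; simp at h
    · intro G h; simp only [List.map_nil, List.foldl_nil, Option.some.injEq] at h
      simp [← h]
  | cons v t ih =>
    intro g0 hg
    simp only [List.map_cons, List.foldl_cons, Option.bind_some]
    rw [euclidA_natCast g0 v hg]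
    by_cases hc : Nat.gcd g0 v = 1 ∧ g0 ≠ 1
    · rw [if_pos hc, foldl_bind_none]
      constructor
      · intro _
        rw [show Nat.gcd v g0 = 1 from by rw [Nat.gcd_comm]; exact hc.1]
        exact foldl_gcd_one t
      · intro G h; simp at h
    · rw [if_neg hc]
      have hg' : 1 ≤ Nat.gcd g0 v := Nat.gcd_pos_of_pos_left v hg
      have h2 := ih (Nat.gcd g0 v) hg'
      rw [show Nat.gcd v g0 = Nat.gcd g0 v from Nat.gcd_comm v g0]
      exact h2

-- a fold rewriting every existing key of a dict in place
lemma getD_foldl_insert_fn (f : Int → Int) : ∀ (ks : List Int), ks.Nodup →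
    ∀ (d : PySem.Dict Int Int) (k : Int),
    (ks.foldl (fun d s => d.insert s (f (d.getD s 0))) d).getD k 0
      = if k ∈ ks then f (d.getD k 0) else d.getD k 0 := by
  intro ks
  induction ks with
  | nil => intro _ d k; simp
  | cons s t ih =>
    intro hnd d k
    obtain ⟨hs, ht⟩ := List.nodup_cons.mp hnd
    simp only [List.foldl_cons]
    rw [ih ht (d.insert s (f (d.getD s 0))) k]
    by_cases hk : k ∈ t
    · have hks : k ≠ s := fun e => hs (e ▸ hk)
      rw [if_pos hk, if_pos (List.mem_cons_of_mem _ hk), PySem.Dict.getD_insert_of_ne _ _ _ hks]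
    · rw [if_neg hk]
      by_cases he : k = s
      · subst he
        rw [PySem.Dict.getD_insert_self, if_pos (List.mem_cons_self)]
      · rw [PySem.Dict.getD_insert_of_ne _ _ _ he,
          if_neg (by simp [List.mem_cons, he, hk])]

lemma keys_foldl_insert_self (d : PySem.Dict Int Int) (f : PySem.Dict Int Int → Int → Int) :
    (d.keys.foldl (fun d' s => d'.insert s (f d' s)) d).keys = d.keys := by
  rw [PySem.Dict.keys_foldl_insert, PySem.Set.update_eq_append_filter]
  have hnil : List.filter (fun y => !PySem.Set.contains d.keys y) (PySem.Set.ofList d.keys) = [] := by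
    apply List.filter_eq_nil_iff.mpr
    intro a ha
    have ham : a ∈ d.keys := (PySem.Set.mem_ofList _ _).mp ha
    simp [PySem.Set.contains_eq_listContains, ham]
  rw [hnil, List.append_nil]

lemma getD_foldl_insert_one (ks : List Int) (hnd : ks.Nodup) (d : PySem.Dict Int Int) (k : Int) :
    (ks.foldl (fun d s => d.insert s 1) d).getD k 0 = if k ∈ ks then 1 else d.getD k 0 := by
  simpa using getD_foldl_insert_fn (fun _ => 1) ks hnd d k

lemma getD_foldl_insert_div (g : Int) (ks : List Int) (hnd : ks.Nodup) (d : PySem.Dict Int Int) (k : Int) :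
    (ks.foldl (fun d s => d.insert s (PySem.Int.floordiv (d.getD s 0) g)) d).getD k 0
      = if k ∈ ks then PySem.Int.floordiv (d.getD k 0) g else d.getD k 0 := by
  simpa using getD_foldl_insert_fn (fun x => PySem.Int.floordiv x g) ks hnd d k

-- characterisation of the unify_an port: its keys are the counter's keys
lemma unify_keys (numbers : List Int) : (pvUnifyAn numbers).keys = (PySem.Dict.counter numbers).keys := by
  unfold pvUnifyAn
  dsimp only
  rw [counterA_eq]
  split
  · exact keys_foldl_insert_self _ _
  · split
    · rfl
    · split
      · rfl
      · exact keys_foldl_insert_self _ _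

-- … and its values are the counts divided by B's gcd
lemma unify_getD (numbers : List Int) (h : numbers ≠ []) (k : Int)
    (hk : k ∈ (PySem.Dict.counter (κ := Int) numbers).keys) :
    (pvUnifyAn numbers).getD k 0
      = PySem.Int.floordiv ((PySem.Dict.counter numbers).getD k 0)
          ((PySem.Dict.counter (κ := Int) numbers).values.foldl pvGcdLoop 0) := by
  have hnd := PySem.Dict.nodup_keys_counter (κ := Int) numbers
  have hvals : (PySem.Dict.counter (κ := Int) numbers).values
      = ((PySem.Set.ofList numbers).map (fun a => numbers.count a)).map (fun (n : Nat) => (n : Int)) := by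
    show ((PySem.Dict.counter (κ := Int) numbers).items.map (·.2)) = _
    rw [PySem.Dict.items_counter]
    rw [List.map_map, List.map_map]
    rfl
  set valsN := (PySem.Set.ofList numbers).map (fun a => numbers.count a) with hvalsN
  have hvpos : ∀ x ∈ valsN, 1 ≤ x := by
    intro x hx
    rw [hvalsN] at hx
    obtain ⟨a, ha, rfl⟩ := List.mem_map.mp hx
    exact List.count_pos_iff.mpr ((PySem.Set.mem_ofList _ _).mp ha)
  have hcount : (PySem.Dict.counter (κ := Int) numbers).getD k 0 = ((numbers.count k : Nat) : Int) := by
    have hkm : k ∈ PySem.Set.ofList numbers := by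
      rw [← PySem.Dict.keys_counter]; exact hk
    have hitem : (k, ((numbers.count k : Nat) : Int)) ∈ (PySem.Dict.counter (κ := Int) numbers).items := by
      rw [PySem.Dict.items_counter]
      exact List.mem_map.mpr ⟨k, hkm, rfl⟩
    exact PySem.Dict.getD_of_mem_items _ hitem hnd 0
  set F := fun (x y : Nat) => Nat.gcd y x with hF
  have hgB : (PySem.Dict.counter (κ := Int) numbers).values.foldl pvGcdLoop 0
      = ((valsN.foldl F 0 : Nat) : Int) := by
    rw [hvals]
    exact_mod_cast foldl_gcdLoop_natCast valsN 0
  have hperm : (PySem.List.sorted (PySem.Dict.counter (κ := Int) numbers).values (fun x => x) false).Perm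
      (PySem.Dict.counter (κ := Int) numbers).values := PySem.List.sorted_perm _ _ _
  set natom := PySem.List.sorted (PySem.Dict.counter (κ := Int) numbers).values (fun x => x) false with hnatomdef
  have hnatompos : ∀ x ∈ natom, ∃ m : Nat, x = (m : Int) ∧ 1 ≤ m := by
    intro x hx
    have hxv : x ∈ (PySem.Dict.counter (κ := Int) numbers).values := hperm.mem_iff.mp hx
    rw [hvals] at hxv
    obtain ⟨m, hm, rfl⟩ := List.mem_map.mp hxv
    exact ⟨m, rfl, hvpos m hm⟩
  set natomN := natom.map Int.toNat with hnatomN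
  have hcastN : natomN.map (fun (n : Nat) => (n : Int)) = natom := by
    rw [hnatomN, List.map_map]
    conv_rhs => rw [← List.map_id natom]
    apply List.map_congr_left
    intro x hx
    obtain ⟨m, rfl, _⟩ := hnatompos x hx
    simp [Function.comp]
  have hpermN : natomN.Perm valsN := by
    have h1 := hperm.map Int.toNat
    rw [hvals, List.map_map] at h1
    have h2 : valsN.map (Int.toNat ∘ fun (n : Nat) => (n : Int)) = valsN := by
      rw [show (Int.toNat ∘ fun (n : Nat) => (n : Int)) = id from funext fun n => by simp,
        List.map_id]
    rw [h2] at h1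
    exact hnatomN ▸ h1
  have hrc : RightCommutative F := ⟨fun a b c => by
    simp only [hF]
    rw [Nat.gcd_comm c, Nat.gcd_assoc, Nat.gcd_comm a c, ← Nat.gcd_assoc]⟩
  have hfoldperm : ∀ a : Nat, natomN.foldl F a = valsN.foldl F a :=
    fun a => @List.Perm.foldl_eq _ _ F _ _ hrc hpermN a
  unfold pvUnifyAn
  dsimp only
  rw [counterA_eq, ← hnatomdef]
  by_cases hlen : natom.length = 1
  · rw [if_pos hlen]
    rw [getD_foldl_insert_one _ hnd _ k, if_pos hk]
    obtain ⟨x, hx⟩ : ∃ x, natom = [x] := by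
      cases hn : natom with
      | nil => rw [hn] at hlen; simp at hlen
      | cons a t =>
        cases t with
        | nil => exact ⟨a, rfl⟩
        | cons b t2 => rw [hn] at hlen; simp at hlen
    have hvx : (PySem.Dict.counter (κ := Int) numbers).values = [x] := by
      apply List.perm_singleton.mp
      rw [← hx]
      exact hperm.symm
    obtain ⟨m, hm1, hmx⟩ : ∃ m : Nat, 1 ≤ m ∧ x = (m : Int) := by
      have : x ∈ natom := by rw [hx]; exact List.mem_singleton.mpr rfl
      obtain ⟨m, he, hm⟩ := hnatompos x this
      exact ⟨m, hm, he⟩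
    have hvalsNm : valsN = [m] := by
      have : valsN.map (fun (n : Nat) => (n : Int)) = [(m : Int)] := by
        rw [← hvals, hvx, hmx]
      cases hv : valsN with
      | nil => rw [hv] at this; simp at this
      | cons a t =>
        rw [hv] at this
        simp only [List.map_cons, List.cons.injEq] at this
        obtain ⟨ha, ht⟩ := this
        have : t = [] := List.map_eq_nil_iff.mp ht
        subst this
        have : a = m := by exact_mod_cast ha
        subst this; rfl
    have hCk : (PySem.Dict.counter (κ := Int) numbers).getD k 0 = (m : Int) := by
      have hkeysmap := PySem.Dict.values_eq_map_keys (PySem.Dict.counter (κ := Int) numbers) hnd 0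
      rw [hvx] at hkeysmap
      cases hkc : (PySem.Dict.counter (κ := Int) numbers).keys with
      | nil => rw [hkc] at hk; simp at hk
      | cons a t =>
        rw [hkc] at hkeysmap hk
        have ht : t = [] := by
          cases t with
          | nil => rfl
          | cons b t2 => simp at hkeysmap
        subst ht
        have hka : k = a := by simpa using hk
        subst hka
        have hx2 : (PySem.Dict.counter (κ := Int) numbers).getD k 0 = x := by
          simpa using hkeysmap.symm
        rw [hx2, hmx]
    rw [hgB, hvalsNm, hCk]
    show (1 : Int) = PySem.Int.floordiv (m : Int) ((Nat.gcd m 0 : Nat) : Int)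
    rw [Nat.gcd_zero_right, PySem.Int.floordiv_natCast, Nat.div_self (by omega)]
    rfl
  · rw [if_neg hlen]
    have hnnil : natom ≠ [] := by
      intro e
      rw [hnatomdef, PySem.List.sorted_eq_nil_iff] at e
      rw [hvals] at e
      obtain ⟨x, hx⟩ := List.exists_mem_of_ne_nil numbers h
      have : x ∈ PySem.Set.ofList numbers := (PySem.Set.mem_ofList _ _).mpr hx
      rw [hvalsN] at e
      simp only [List.map_eq_nil_iff] at e
      rw [e] at this
      simp at this
    clear_value natom natomN
    split
    · exact absurd rfl hnnil
    · rename_i g0 rest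
      cases hNx : natomN with
      | nil =>
        rw [hNx] at hcastN
        simp at hcastN
      | cons g0N restN =>
        rw [hNx] at hcastN
        simp only [List.map_cons, List.cons.injEq] at hcastN
        obtain ⟨hg0, hrest⟩ := hcastN
        have hg0N : 1 ≤ g0N := by
          obtain ⟨m, he, hm⟩ := hnatompos g0 List.mem_cons_self
          have : g0N = m := by
            have := he ▸ hg0
            exact_mod_cast this
          omega
        have hchain : valsN.foldl F 0 = restN.foldl F g0N := by
          rw [← hfoldperm 0, hNx]
          simp only [List.foldl_cons, hF]
          rw [Nat.gcd_zero_right]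
        split
        · rename_i hfold
          have hfoldN : (restN.map (fun (n : Nat) => (n : Int))).foldl
              (fun acc i => acc.bind fun g => pvEuclidA g i) (some ((g0N : Nat) : Int)) = none := by
            rw [hrest, hg0]; exact hfold
          have hg1 : restN.foldl F g0N = 1 := by
            have := (foldl_euclidA restN g0N hg0N).1 hfoldN
            simpa [hF] using this
          rw [hcount, hgB, hchain, hg1, PySem.Int.floordiv_natCast, Nat.div_one]
        · rename_i G hfold
          have hfoldN : (restN.map (fun (n : Nat) => (n : Int))).foldl
              (fun acc i => acc.bind fun g => pvEuclidA g i) (some ((g0N : Nat) : Int)) = some G := by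
            rw [hrest, hg0]; exact hfold
          have hG : G = ((restN.foldl F g0N : Nat) : Int) := by
            have := (foldl_euclidA restN g0N hg0N).2 G hfoldN
            simpa [hF] using this
          rw [getD_foldl_insert_div G _ hnd _ k, if_pos hk, hgB, hchain, hG]

-- unfolding equations for A's inner scan
lemma pvFindA_cons_pos {k2 v c : Int} {rest : List (Int × Int)} (h : v = c) :
    pvFindA ((k2, v) :: rest) c = (some k2, rest) := by
  simp [pvFindA, h]

lemma pvFindA_cons_neg {k2 v c : Int} {rest : List (Int × Int)} (h : ¬ v = c) :
    pvFindA ((k2, v) :: rest) c = ((pvFindA rest c).1, (k2, v) :: (pvFindA rest c).2) := by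
  simp [pvFindA, h]

-- A's scan returns the first key with the wanted count …
lemma findA_fst (c : Int) : ∀ (loc : List (Int × Int)),
    (pvFindA loc c).1 = (((loc.filter (fun q => q.2 == c)).map Prod.fst).head?) := by
  intro loc
  induction loc with
  | nil => rfl
  | cons p rest ih =>
    obtain ⟨k2, v⟩ := p
    by_cases h : v = c
    · rw [pvFindA_cons_pos h]
      subst h
      simp
    · rw [pvFindA_cons_neg h]
      simp [h, ih]

-- … and removes exactly that entry: per-count key lists of the remainder
lemma findA_snd (c : Int) : ∀ (loc : List (Int × Int)) (c' : Int),
    ((pvFindA loc c).2.filter (fun q => q.2 == c')).map Prod.fst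
      = if c' = c then ((loc.filter (fun q => q.2 == c)).map Prod.fst).tail
        else (loc.filter (fun q => q.2 == c')).map Prod.fst := by
  intro loc
  induction loc with
  | nil => intro c'; simp [pvFindA]
  | cons p rest ih =>
    intro c'
    obtain ⟨k2, v⟩ := p
    by_cases h : v = c
    · rw [pvFindA_cons_pos h]
      by_cases h' : c' = c
      · rw [if_pos h', List.filter_cons_of_pos (by simpa using h)]
        simp [h']
      · rw [if_neg h',
          List.filter_cons_of_neg (by simpa using fun e : v = c' => h' ((e.symm.trans h)))]
    · rw [pvFindA_cons_neg h]
      by_cases h' : c' = c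
      · rw [if_pos h',
          List.filter_cons_of_neg (by simpa using fun e : v = c' => h (e.trans h')),
          List.filter_cons_of_neg (by simpa using h)]
        have hih := ih c'
        rw [if_pos h'] at hih
        exact hih
      · rw [if_neg h']
        have hih := ih c'
        rw [if_neg h'] at hih
        by_cases hv : v = c'
        · rw [List.filter_cons_of_pos (by simpa using hv), List.filter_cons_of_pos (by simpa using hv)]
          simp only [List.map_cons]
          rw [hih]
        · rw [List.filter_cons_of_neg (by simpa using hv), List.filter_cons_of_neg (by simpa using hv)]
          exact hih

-- the grouping dict holds, for each count, the keys of the atomnn entries with that count in order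
lemma queues_getD : ∀ (l : List (Int × Int)) (d : PySem.Dict Int (List Int)) (c : Int),
    (l.foldl (fun d p => d.insert p.2 (d.getD p.2 [] ++ [p.1])) d).getD c []
      = d.getD c [] ++ (l.filter (fun q => q.2 == c)).map Prod.fst := by
  intro l
  induction l with
  | nil => intro d c; simp
  | cons p t ih =>
    intro d c
    simp only [List.foldl_cons]
    rw [ih]
    by_cases h : c = p.2
    · subst h
      rw [PySem.Dict.getD_insert_self, List.filter_cons_of_pos (by simp)]
      simp
    · rw [PySem.Dict.getD_insert_of_ne _ _ _ h, List.filter_cons_of_neg (by simpa using fun e => h e.symm)]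

-- the main loop invariant: A's scan-and-delete over loc and B's queue-popping agree key for key
lemma main_loop : ∀ (pend : List (Int × Int)), (pend.map Prod.fst).Nodup →
    ∀ (O : PySem.Dict Int Int) (loc : List (Int × Int)) (R : PySem.Dict Int Int)
      (Q : PySem.Dict Int (List Int)),
    (∀ p ∈ pend, O.getD p.1 0 = p.2) →
    (∀ c, Q.getD c [] = (loc.filter (fun q => q.2 == c)).map Prod.fst) →
    ∀ k,
      (k ∈ pend.map Prod.fst →
        ((pend.map Prod.fst).foldl pvStepA (O, loc)).1.getD k 0
          = (pend.foldl pvStepB (R, Q)).1.getD k 0)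
      ∧ (k ∉ pend.map Prod.fst →
        ((pend.map Prod.fst).foldl pvStepA (O, loc)).1.getD k 0 = O.getD k 0
          ∧ (pend.foldl pvStepB (R, Q)).1.getD k 0 = R.getD k 0) := by
  intro pend
  induction pend with
  | nil =>
    intro _ O loc R Q hO hQ k
    exact ⟨fun h => by simp at h, fun _ => ⟨rfl, rfl⟩⟩
  | cons p t ih =>
    intro hnd O loc R Q hO hQ k
    rw [List.map_cons] at hnd
    obtain ⟨hp, ht⟩ := List.nodup_cons.mp hnd
    have hc : O.getD p.1 0 = p.2 := hO p List.mem_cons_self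
    have hfst := findA_fst p.2 loc
    have hQc := hQ p.2
    simp only [List.map_cons, List.foldl_cons]
    cases hq : Q.getD p.2 [] with
    | nil =>
      have hnone : (pvFindA loc p.2).1 = none := by
        rw [hfst, ← hQc, hq]; rfl
      have hstepA : pvStepA (O, loc) p.1 = (O, (pvFindA loc p.2).2) := by
        unfold pvStepA
        simp only [hc]
        rcases hfa : pvFindA loc p.2 with ⟨o, l2⟩
        rw [hfa] at hnone
        simp only at hnone
        subst hnone
        rfl
      have hstepB : pvStepB (R, Q) p = (R.insert p.1 p.2, Q) := by
        unfold pvStepB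
        simp only [hq]
      rw [hstepA, hstepB]
      have hQ' : ∀ c, Q.getD c [] = (((pvFindA loc p.2).2.filter (fun q => q.2 == c)).map Prod.fst) := by
        intro c
        rw [findA_snd p.2 loc c]
        by_cases hcc : c = p.2
        · subst hcc
          rw [if_pos rfl, ← hQc, hq]
          rfl
        · rw [if_neg hcc]
          exact hQ c
      have hO' : ∀ q ∈ t, O.getD q.1 0 = q.2 := fun q hqt => hO q (List.mem_cons_of_mem _ hqt)
      have IH := ih ht O (pvFindA loc p.2).2 (R.insert p.1 p.2) Q hO' hQ'
      constructor
      · intro hk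
        have hk2 : k = p.1 ∨ k ∈ t.map Prod.fst := by simpa using hk
        rcases hk2 with he | hkt
        · have hknott : k ∉ t.map Prod.fst := by rw [he]; exact hp
          obtain ⟨hA, hB⟩ := (IH k).2 hknott
          rw [hA, hB, he, hc, PySem.Dict.getD_insert_self]
        · exact (IH k).1 hkt
      · intro hk
        have hkt : k ∉ t.map Prod.fst := fun hmem => hk (by simp [hmem])
        have hkp : k ≠ p.1 := fun e => hk (by simp [e])
        obtain ⟨hA, hB⟩ := (IH k).2 hkt
        exact ⟨hA, by rw [hB, PySem.Dict.getD_insert_of_ne _ _ _ hkp]⟩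
    | cons x rest =>
      have hsome : (pvFindA loc p.2).1 = some x := by
        rw [hfst, ← hQc, hq]; rfl
      have hstepA : pvStepA (O, loc) p.1 = (O.insert p.1 x, (pvFindA loc p.2).2) := by
        unfold pvStepA
        simp only [hc]
        rcases hfa : pvFindA loc p.2 with ⟨o, l2⟩
        rw [hfa] at hsome
        simp only at hsome
        subst hsome
        rfl
      have hstepB : pvStepB (R, Q) p = (R.insert p.1 x, Q.insert p.2 rest) := by
        unfold pvStepB
        simp only [hq]
      rw [hstepA, hstepB]
      have hQ' : ∀ c, (Q.insert p.2 rest).getD c []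
          = (((pvFindA loc p.2).2.filter (fun q => q.2 == c)).map Prod.fst) := by
        intro c
        rw [findA_snd p.2 loc c, PySem.Dict.getD_insert]
        by_cases hcc : c = p.2
        · rw [if_pos hcc, if_pos hcc, ← hQc, hq]
          rfl
        · rw [if_neg hcc, if_neg hcc]
          exact hQ c
      have hO' : ∀ q ∈ t, (O.insert p.1 x).getD q.1 0 = q.2 := by
        intro q hqt
        have hq1 : q.1 ≠ p.1 := by
          intro e
          exact hp (e ▸ List.mem_map.mpr ⟨q, hqt, rfl⟩)
        rw [PySem.Dict.getD_insert_of_ne _ _ _ hq1]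
        exact hO q (List.mem_cons_of_mem _ hqt)
      have IH := ih ht (O.insert p.1 x) (pvFindA loc p.2).2 (R.insert p.1 x) (Q.insert p.2 rest) hO' hQ'
      constructor
      · intro hk
        have hk2 : k = p.1 ∨ k ∈ t.map Prod.fst := by simpa using hk
        rcases hk2 with he | hkt
        · have hknott : k ∉ t.map Prod.fst := by rw [he]; exact hp
          obtain ⟨hA, hB⟩ := (IH k).2 hknott
          rw [hA, hB, he, PySem.Dict.getD_insert_self, PySem.Dict.getD_insert_self]
        · exact (IH k).1 hkt
      · intro hk
        have hkt : k ∉ t.map Prod.fst := fun hmem => hk (by simp [hmem])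
        have hkp : k ≠ p.1 := fun e => hk (by simp [e])
        obtain ⟨hA, hB⟩ := (IH k).2 hkt
        rw [hA, hB, PySem.Dict.getD_insert_of_ne _ _ _ hkp, PySem.Dict.getD_insert_of_ne _ _ _ hkp]
        exact ⟨rfl, rfl⟩

-- ===== VERDICT (by name: the statement is the Claim_ definition above) =====
theorem subst_ele_spec : Claim_equal_subst_ele := by
  intro numbers atomnn _ hne
  unfold Spec_subst_ele subst_ele subst_ele_alt
  dsimp only
  rw [counterB_eq]
  set g := (PySem.Dict.counter (κ := Int) numbers).values.foldl pvGcdLoop 0 with hgdef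
  have hBfold : (PySem.Dict.counter (κ := Int) numbers).items.foldl (pvRelStep g)
        (PySem.Dict.empty, pvQueues atomnn)
      = ((PySem.Dict.counter (κ := Int) numbers).items.map
          (fun q => (q.1, PySem.Int.floordiv q.2 g))).foldl pvStepB
        (PySem.Dict.empty, pvQueues atomnn) := by
    rw [List.foldl_map]
    rfl
  set RI := (PySem.Dict.counter (κ := Int) numbers).items.map
      (fun q => (q.1, PySem.Int.floordiv q.2 g)) with hRI
  have hkeys : RI.map Prod.fst = (PySem.Dict.counter (κ := Int) numbers).keys := by
    rw [hRI, List.map_map]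
    rfl
  have hndC : (RI.map Prod.fst).Nodup := by
    rw [hkeys]; exact PySem.Dict.nodup_keys_counter numbers
  have hO : ∀ q ∈ RI, (pvUnifyAn numbers).getD q.1 0 = q.2 := by
    intro q hqRI
    rw [hRI] at hqRI
    obtain ⟨⟨a, v⟩, hmem, rfl⟩ := List.mem_map.mp hqRI
    have hakeys : a ∈ (PySem.Dict.counter (κ := Int) numbers).keys :=
      PySem.Dict.mem_keys_of_mem_items _ hmem
    have hv : (PySem.Dict.counter (κ := Int) numbers).getD a 0 = v :=
      PySem.Dict.getD_of_mem_items _ hmem (PySem.Dict.nodup_keys_counter numbers) 0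
    have hu := unify_getD numbers hne a hakeys
    rw [hv] at hu
    exact hu
  have hQ0 : ∀ c, (pvQueues atomnn).getD c [] = (atomnn.filter (fun q => q.2 == c)).map Prod.fst := by
    intro c
    unfold pvQueues
    rw [queues_getD]
    simp [PySem.Dict.getD_empty]
  have ML := main_loop RI hndC (pvUnifyAn numbers) atomnn PySem.Dict.empty (pvQueues atomnn) hO hQ0
  rw [hBfold, unify_keys numbers, ← hkeys]
  apply List.map_congr_left
  intro n hn
  have hnk : n ∈ RI.map Prod.fst := by
    rw [hkeys, PySem.Dict.keys_counter]
    exact (PySem.Set.mem_ofList numbers n).mpr hn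
  exact (ML n).1 hnk
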